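-- pv_equiv track=rewrite | github.com/TahaGhadhab/industrial-layout-optimizer | backend/algorithms/layout.py | triangular_matrix
-- ===== SOURCE A (Python) =====
-- def triangular_matrix(flow: list[list[int]]) -> list[list[int | None]]:
--     """Create upper-triangular matrix of bidirectional flows."""
--     n = len(flow)
--     triangular = []
--     for i in range(n):
--         row = []
--         for j in range(n):
--             if j > i:
--                 row.append(flow[i][j] + flow[j][i])
--             else:
--                 row.append(None)
--         triangular.append(row)
--     return triangular
-- ===== SOURCE B (Python) =====
-- def triangular_matrix(flow: list[list[int]]) -> list[list[int | None]]:
--     """Create upper-triangular matrix of bidirectional flows.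
--
--     Recursive peel: compute the first result row directly, strip the first
--     row and column of `flow`, recurse on the smaller matrix, and prepend a
--     None to each recursive row.
--     """
--     if not flow:
--         return []
--     n = len(flow)
--     first = [None] + [flow[0][j] + flow[j][0] for j in range(1, n)]
--     sub = [row[1:] for row in flow[1:]]
--     return [first] + [[None] + r for r in triangular_matrix(sub)]
-- ===== Notes on version B (the rewrite author's own statement) =====
-- stated objective: alternative
-- what changed: Replaces A's nested scan over all n*n cells with a per-cell j>i branch by a recursive peel: compute the first result row directly, strip the first row and column of flow, recurse on the (n-1)x(n-1) submatrix, and prepend a None to each recursive row.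
import Mathlib
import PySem

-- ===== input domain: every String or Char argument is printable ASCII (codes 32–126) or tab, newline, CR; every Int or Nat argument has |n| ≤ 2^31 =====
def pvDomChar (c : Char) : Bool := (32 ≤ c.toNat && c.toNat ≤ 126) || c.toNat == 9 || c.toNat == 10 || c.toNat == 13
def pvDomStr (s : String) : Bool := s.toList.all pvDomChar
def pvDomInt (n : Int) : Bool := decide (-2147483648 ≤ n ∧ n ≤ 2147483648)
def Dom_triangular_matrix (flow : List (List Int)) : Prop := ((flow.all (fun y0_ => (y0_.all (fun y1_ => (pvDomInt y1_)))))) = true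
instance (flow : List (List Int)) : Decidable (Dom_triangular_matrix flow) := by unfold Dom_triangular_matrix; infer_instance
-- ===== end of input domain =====

-- B computes the matrix by recursive peeling — first result row directly, then recurse on
-- flow with its first row and column stripped, prepending a None to each recursive row —
-- instead of A's nested scan over all n×n cells with a per-cell branch (objective: alternative).

-- ===== PORT A =====
def triangular_matrix (flow : List (List Int)) : List (List (Option Int)) :=
  let n : Int := flow.length
  (PySem.List.pyRange 0 n 1).foldl (fun triangular i =>
    triangular ++ [(PySem.List.pyRange 0 n 1).foldl (fun row j =>
      row ++ [if j > i then
                some (PySem.List.pyGetD (PySem.List.pyGetD flow i []) j 0 +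
                      PySem.List.pyGetD (PySem.List.pyGetD flow j []) i 0)
              else none]) []]) []

-- ===== PORT B =====
def triangular_matrix_alt (flow : List (List Int)) : List (List (Option Int)) :=
  match flow with
  | [] => []
  | f0 :: rest =>
    let n : Int := (f0 :: rest).length
    let first : List (Option Int) :=
      none :: (PySem.List.pyRange 1 n 1).map (fun j =>
        some (PySem.List.pyGetD f0 j 0 +
              PySem.List.pyGetD (PySem.List.pyGetD (f0 :: rest) j []) 0 0))
    let sub : List (List Int) := rest.map (fun row => PySem.List.slice row (some 1) none)
    first :: (triangular_matrix_alt sub).map (fun r => none :: r)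
termination_by flow.length
decreasing_by simp

-- ===== PRECONDITION & SPEC =====
-- Pre_: exactly the inputs on which the Python A returns (every non-last row must reach column n-1,
-- the last row only columns 0..n-2); outside it both Pythons raise IndexError.
def Pre_triangular_matrix (flow : List (List Int)) : Prop :=
  ∀ k, k < flow.length →
    (if k + 1 = flow.length then flow.length - 1 else flow.length) ≤ (flow.getD k []).length
instance (flow : List (List Int)) : Decidable (Pre_triangular_matrix flow) := by
  unfold Pre_triangular_matrix; infer_instance

def pvWitness_triangular_matrix : List (List Int) := [[0, 2], [3, 0]]

def Spec_triangular_matrix (flow : List (List Int)) (out : List (List (Option Int))) : Prop := out = triangular_matrix_alt flow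
instance (flow : List (List Int)) (out : List (List (Option Int))) : Decidable (Spec_triangular_matrix flow out) := by unfold Spec_triangular_matrix; infer_instance

-- ===== CLAIM (what is proved, stated in full; the proofs are below) =====
def Claim_equal_triangular_matrix : Prop := ∀ (flow : List (List Int)), Dom_triangular_matrix flow → Pre_triangular_matrix flow → Spec_triangular_matrix flow (triangular_matrix flow)

-- ===== LEMMAS AND PROOFS =====

-- The common closed form both ports are reduced to: row i is i+1 Nones followed by the
-- upper-triangle sums for j in (i+1..n).
def triRow (flow : List (List Int)) (n i : Int) : List (Option Int) :=
  List.replicate (i + 1).toNat (none : Option Int) ++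
    (PySem.List.pyRange (i + 1) n 1).map (fun j =>
      some (PySem.List.pyGetD (PySem.List.pyGetD flow i []) j 0 +
            PySem.List.pyGetD (PySem.List.pyGetD flow j []) i 0))

def triSpec (flow : List (List Int)) : List (List (Option Int)) :=
  (PySem.List.pyRange 0 flow.length 1).map (triRow flow flow.length)

-- index shifts on pyGetD for nonnegative indices
lemma pyGetD_tail_shift (xs : List Int) (j : Int) (hj : 0 ≤ j) :
    PySem.List.pyGetD xs.tail j (0 : Int) = PySem.List.pyGetD xs (j + 1) 0 := by
  rw [PySem.List.pyGetD_of_nonneg _ _ hj, PySem.List.pyGetD_of_nonneg _ _ (by omega)]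
  have : (j + 1).toNat = j.toNat + 1 := by omega
  simp [this, List.getD]

lemma pyGetD_cons_shift {α : Type} (x : α) (xs : List α) (i : Int) (d : α) (hi : 0 ≤ i) :
    PySem.List.pyGetD (x :: xs) (i + 1) d = PySem.List.pyGetD xs i d := by
  rw [PySem.List.pyGetD_of_nonneg _ _ (by omega), PySem.List.pyGetD_of_nonneg _ _ hi]
  have : (i + 1).toNat = i.toNat + 1 := by omega
  simp [this, List.getD]

lemma pyGetD_map_drop (rest : List (List Int)) (i : Int) (hi : 0 ≤ i) :
    PySem.List.pyGetD (rest.map (fun row => row.tail)) i ([] : List Int) =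
      (PySem.List.pyGetD rest i []).tail := by
  rw [PySem.List.pyGetD_of_nonneg _ _ hi, PySem.List.pyGetD_of_nonneg _ _ hi]
  simp [List.getD, List.getElem?_map]
  cases rest[i.toNat]? <;> simp

-- A's inner loop over the full range 0..n-1, with the j > i branch, produces the closed-form row.
lemma row_eq (n i : Int) (g : Int → Option Int) (h0 : 0 ≤ i) (hn : i < n) :
    (PySem.List.pyRange 0 n 1).map (fun j => if j > i then g j else none) =
      List.replicate (i + 1).toNat (none : Option Int) ++ (PySem.List.pyRange (i + 1) n 1).map g := by
  rw [PySem.List.pyRange_one_append 0 (i + 1) n (by omega) (by omega), List.map_append]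
  congr 1
  · have hlen : ((PySem.List.pyRange 0 (i + 1) 1).map (fun j => if j > i then g j else none)).length
        = (i + 1).toNat := by
      simp [PySem.List.length_pyRange_one]
    rw [List.eq_replicate_iff]
    refine ⟨hlen, ?_⟩
    intro b hb
    rcases List.mem_map.mp hb with ⟨j, hj, rfl⟩
    have := (PySem.List.mem_pyRange_one).mp hj
    simp [show ¬ j > i by omega]
  · apply List.map_congr_left
    intro j hj
    have := (PySem.List.mem_pyRange_one).mp hj
    simp [show j > i by omega]

lemma a_eq_triSpec (flow : List (List Int)) : triangular_matrix flow = triSpec flow := by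
  unfold triangular_matrix triSpec
  rw [PySem.List.foldl_append_singleton_eq_map]
  apply List.map_congr_left
  intro i hi
  have hmem := (PySem.List.mem_pyRange_one).mp hi
  rw [PySem.List.foldl_append_singleton_eq_map]
  exact row_eq _ i _ hmem.1 hmem.2

-- one recursive step: prepending a None to row k of the peeled matrix gives row k+1 of the full one
lemma shift_row (f0 : List Int) (rest : List (List Int)) (k : Int) (hk : 0 ≤ k) :
    none :: triRow (rest.map (fun row => row.tail)) rest.length k
      = triRow (f0 :: rest) ((rest.length : Int) + 1) (k + 1) := by
  unfold triRow
  have hrep : (none : Option Int) :: List.replicate (k + 1).toNat (none : Option Int)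
      = List.replicate (k + 1 + 1).toNat none := by
    have h : (k + 1 + 1).toNat = (k + 1).toNat + 1 := by omega
    rw [h, List.replicate_succ]
  rw [← List.cons_append, hrep]
  congr 1
  rw [PySem.List.pyRange_one, PySem.List.pyRange_one, List.map_map, List.map_map]
  have hlen : ((rest.length : Int) + 1 - (k + 1 + 1)).toNat = ((rest.length : Int) - (k + 1)).toNat := by
    omega
  rw [hlen]
  apply List.map_congr_left
  intro t ht
  simp only [Function.comp_apply]
  rw [pyGetD_map_drop rest k hk, pyGetD_map_drop rest (k + 1 + (t : Int)) (by omega),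
      pyGetD_tail_shift _ (k + 1 + (t : Int)) (by omega), pyGetD_tail_shift _ k hk]
  have c1 : k + 1 + 1 + (t : Int) = (k + 1 + (t : Int)) + 1 := by ring
  rw [c1, pyGetD_cons_shift f0 rest (k + 1 + (t : Int)) [] (by omega),
      pyGetD_cons_shift f0 rest k [] hk]

lemma alt_eq_triSpec (flow : List (List Int)) : triangular_matrix_alt flow = triSpec flow := by
  induction flow using triangular_matrix_alt.induct with
  | case1 => simp [triangular_matrix_alt, triSpec, PySem.List.pyRange_one_eq_nil]
  | case2 f0 rest a ih =>
    rw [triangular_matrix_alt]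
    have hslice : (fun row : List Int => PySem.List.slice row (some 1) none)
        = (fun row : List Int => row.tail) := by
      funext row; rw [PySem.List.slice_from_one]
    have ha : a = rest.map (fun row : List Int => row.tail) := by
      simp [a, hslice]
    rw [ha] at ih
    rw [show (rest.map fun row => PySem.List.slice row (some 1) none)
          = rest.map (fun row : List Int => row.tail) from by rw [hslice], ih]
    unfold triSpec
    simp only [List.length_map, List.length_cons]
    have hn : ((rest.length + 1 : Nat) : Int) = (rest.length : Int) + 1 := by push_cast; ring
    rw [hn, PySem.List.pyRange_one_cons (show (0 : Int) < (rest.length : Int) + 1 by omega),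
        List.map_cons]
    congr 1
    · unfold triRow
      simp [PySem.List.pyGetD_zero_cons]
    · rw [PySem.List.pyRange_one, PySem.List.pyRange_one, List.map_map, List.map_map,
          List.map_map]
      have hl : ((rest.length : Int) + 1 - (0 + 1)).toNat = ((rest.length : Int) - 0).toNat := by omega
      rw [hl]
      apply List.map_congr_left
      intro t ht
      simp only [Function.comp_apply, zero_add]
      have c : (1 : Int) + (t : Int) = (t : Int) + 1 := by ring
      rw [c]
      exact shift_row f0 rest (t : Int) (by omega)

theorem triangular_matrix_spec : Claim_equal_triangular_matrix := by
  intro flow _ _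
  unfold Spec_triangular_matrix
  rw [a_eq_triSpec, alt_eq_triSpec]
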